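-- pv_equiv track=rewrite | github.com/soumika-m/DSA_Basic | Week1/MathProblem/Python/ReverseEquation.py | reverseEqn
-- ===== SOURCE A (Python) =====
-- def reverseEqn(s):
--     """ T(c) -> O(N) / O(|S|), S(c) -> O(N) """
--     # holds final string
--     newstr = ""
--     # hold number
--     num = ""
--     # start iteration from last to first
--     for char in s[::-1]:
--         # if number add it into num variable to reverse it later
--         if char >= '0' and char <='9':
--             num += char
--         # for operators, add the number at first after reversing, then add operator
--         else:
--             newstr += num[::-1]
--             num = ""
--             newstr += char
--
--     # add last number which is remaining, after reversal
--     newstr += num[::-1]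
--
--     return newstr
-- ===== SOURCE B (Python) =====
-- def reverseEqn(s):
--     # Tokenize forwards into whole numbers and single non-digit chars, then join the tokens in reverse.
--     tokens = []
--     i = 0
--     n = len(s)
--     while i < n:
--         if s[i].isdigit():
--             j = i + 1
--             while j < n and s[j].isdigit():
--                 j += 1
--             tokens.append(s[i:j])
--             i = j
--         else:
--             tokens.append(s[i])
--             i += 1
--     return ''.join(reversed(tokens))
-- ===== Notes on version B (the rewrite author's own statement) =====
-- stated objective: idiomatic
-- what changed: Replaces A's reverse character scan with manual digit accumulation and flush-on-operator by a forward tokenization pass (whole numbers and single non-digit chars as tokens) followed by joining the token list in reverse.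
import Mathlib
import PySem

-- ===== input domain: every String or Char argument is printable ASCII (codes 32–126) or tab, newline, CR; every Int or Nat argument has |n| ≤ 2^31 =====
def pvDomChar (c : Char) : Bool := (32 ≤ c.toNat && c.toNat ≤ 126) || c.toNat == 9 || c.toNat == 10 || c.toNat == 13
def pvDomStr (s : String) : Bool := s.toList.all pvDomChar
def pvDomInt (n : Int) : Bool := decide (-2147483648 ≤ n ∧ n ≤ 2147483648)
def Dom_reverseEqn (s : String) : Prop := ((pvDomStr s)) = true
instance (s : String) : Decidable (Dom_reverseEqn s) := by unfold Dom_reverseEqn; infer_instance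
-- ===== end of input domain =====

-- B replaces A's reverse char-scan with digit-run flushing by a forward tokenizer (numbers kept
-- whole, other chars single tokens) followed by a reversed join; objective: idiomatic decomposition.

-- ===== PORT A =====
-- A's loop state: (newstr, num) as char lists; s[::-1] is reversal (PySem.List.slice?_none_none_neg_one).
def reverseEqnStep (st : List Char × List Char) (c : Char) : List Char × List Char :=
  if '0' ≤ c ∧ c ≤ '9' then (st.1, st.2 ++ [c])
  else (st.1 ++ st.2.reverse ++ [c], [])

def reverseEqn (s : String) : String :=
  let st := s.toList.reverse.foldl reverseEqnStep ([], [])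
  String.ofList (st.1 ++ st.2.reverse)

-- ===== PORT B =====
-- B's outer while-loop over the remaining chars; the inner digit-run while-loop is the takeWhile/dropWhile pair.
def reverseEqnTok : List Char → List (List Char)
  | [] => []
  | c :: rest =>
    if PySem.Chars.isdigit c then
      (c :: rest.takeWhile PySem.Chars.isdigit) :: reverseEqnTok (rest.dropWhile PySem.Chars.isdigit)
    else
      [c] :: reverseEqnTok rest
termination_by l => l.length
decreasing_by
  · exact Nat.lt_succ_of_le (List.length_dropWhile_le _ _)
  · exact Nat.lt_succ_self _

def reverseEqn_alt (s : String) : String :=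
  String.ofList ((reverseEqnTok s.toList).reverse.flatten)

-- ===== PRECONDITION & SPEC =====
def Spec_reverseEqn (s : String) (out : String) : Prop := out = reverseEqn_alt s
instance (s : String) (out : String) : Decidable (Spec_reverseEqn s out) := by unfold Spec_reverseEqn; infer_instance

-- ===== CLAIM (what is proved, stated in full; the proofs are below) =====
def Claim_equal_reverseEqn : Prop := ∀ (s : String), Dom_reverseEqn s → Spec_reverseEqn s (reverseEqn s)

-- ===== LEMMAS AND PROOFS =====

theorem tok_all_digits (d : List Char) (hd : ∀ c ∈ d, PySem.Chars.isdigit c) (hne : d ≠ []) :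
    reverseEqnTok d = [d] := by
  cases d with
  | nil => exact absurd rfl hne
  | cons c rest =>
    have hc : PySem.Chars.isdigit c := hd c (by simp)
    have hrest : ∀ x ∈ rest, PySem.Chars.isdigit x := fun x hx => hd x (by simp [hx])
    rw [reverseEqnTok, if_pos hc, List.takeWhile_eq_self_iff.mpr hrest,
      List.dropWhile_eq_nil_iff.mpr (fun x hx => hrest x hx), reverseEqnTok]

theorem flatten_rev_tok_digits (d : List Char) (hd : ∀ c ∈ d, PySem.Chars.isdigit c) :
    (reverseEqnTok d).reverse.flatten = d := by
  rcases eq_or_ne d [] with rfl | hne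
  · rw [reverseEqnTok]; rfl
  · rw [tok_all_digits d hd hne]; simp

theorem takeWhile_nondigit_append (c : Char) (hc : ¬ PySem.Chars.isdigit c)
    (w : List Char) : ∀ v : List Char,
    (v ++ c :: w).takeWhile PySem.Chars.isdigit = v.takeWhile PySem.Chars.isdigit := by
  intro v
  induction v with
  | nil => simp [List.takeWhile, hc]
  | cons y v'' ihy =>
    by_cases hy : PySem.Chars.isdigit y
    · simp [List.takeWhile, hy, ihy]
    · simp [List.takeWhile, hy]

theorem dropWhile_nondigit_append (c : Char) (hc : ¬ PySem.Chars.isdigit c)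
    (w : List Char) : ∀ v : List Char,
    (v ++ c :: w).dropWhile PySem.Chars.isdigit = v.dropWhile PySem.Chars.isdigit ++ c :: w := by
  intro v
  induction v with
  | nil => simp [List.dropWhile, hc]
  | cons y v'' ihy =>
    by_cases hy : PySem.Chars.isdigit y
    · simp [List.dropWhile, hy, ihy]
    · simp [List.dropWhile, hy]

theorem tok_append (c : Char) (hc : ¬ PySem.Chars.isdigit c)
    (v w : List Char) :
    reverseEqnTok (v ++ c :: w) = reverseEqnTok v ++ [c] :: reverseEqnTok w := by
  cases v with
  | nil => simp [reverseEqnTok, hc]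
  | cons x v' =>
    by_cases hx : PySem.Chars.isdigit x
    · rw [List.cons_append, reverseEqnTok, if_pos hx,
        takeWhile_nondigit_append c hc w v', dropWhile_nondigit_append c hc w v',
        tok_append c hc (v'.dropWhile PySem.Chars.isdigit) w,
        reverseEqnTok, if_pos hx]
      simp
    · rw [List.cons_append, reverseEqnTok, if_neg hx,
        tok_append c hc v' w, reverseEqnTok, if_neg hx]
      simp
termination_by v.length
decreasing_by
  · exact Nat.lt_succ_of_le (List.length_dropWhile_le _ _)
  · exact Nat.lt_succ_self _

theorem flatten_rev_tok_key (v : List Char) (c : Char) (hc : ¬ PySem.Chars.isdigit c)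
    (d : List Char) (hd : ∀ x ∈ d, PySem.Chars.isdigit x) :
    (reverseEqnTok (v ++ c :: d)).reverse.flatten
      = d ++ c :: (reverseEqnTok v).reverse.flatten := by
  rw [tok_append c hc v d]
  simp [flatten_rev_tok_digits d hd]

theorem loop_invariant (t : List Char) :
    ∀ (new num : List Char), (∀ c ∈ num, PySem.Chars.isdigit c) →
      (let st := t.foldl reverseEqnStep (new, num); st.1 ++ st.2.reverse)
        = new ++ (reverseEqnTok (t.reverse ++ num.reverse)).reverse.flatten := by
  induction t with
  | nil =>
    intro new num hnum
    simp only [List.foldl_nil, List.reverse_nil, List.nil_append]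
    rw [flatten_rev_tok_digits num.reverse (fun c hc => hnum c (List.mem_reverse.mp hc))]
  | cons c t' ih =>
    intro new num hnum
    by_cases hc : PySem.Chars.isdigit c
    · have hc' : '0' ≤ c ∧ c ≤ '9' := by
        simpa [PySem.Chars.isdigit] using hc
      have hnum' : ∀ x ∈ num ++ [c], PySem.Chars.isdigit x := by
        intro x hx
        rcases List.mem_append.mp hx with h | h
        · exact hnum x h
        · simp at h; subst h; exact hc
      simp only [List.foldl_cons, reverseEqnStep, if_pos hc']
      rw [ih new (num ++ [c]) hnum']
      simp
    · have hc' : ¬ ('0' ≤ c ∧ c ≤ '9') := by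
        simpa [PySem.Chars.isdigit] using hc
      simp only [List.foldl_cons, reverseEqnStep, if_neg hc']
      rw [ih (new ++ num.reverse ++ [c]) [] (by simp)]
      simp only [List.reverse_cons, List.append_assoc, List.singleton_append,
        List.reverse_nil, List.append_nil]
      rw [flatten_rev_tok_key t'.reverse c hc num.reverse
          (fun x hx => hnum x (List.mem_reverse.mp hx))]

-- ===== VERDICT (by name: the statement is the Claim_ definition above) =====
theorem reverseEqn_spec : Claim_equal_reverseEqn := by
  intro s _
  unfold Spec_reverseEqn reverseEqn reverseEqn_alt
  have h := loop_invariant s.toList.reverse [] [] (by simp)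
  simp only [List.reverse_reverse, List.append_nil, List.reverse_nil, List.nil_append] at h
  simp only [h]
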